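-- pv_equiv track=rewrite | github.com/al-osokin/rueo_global | backend/app/parsing/parser_v3/pipeline.py | split_articles_by_empty_lines
-- ===== SOURCE A (Python) =====
-- from typing import Dict, Iterable, List, Optional
--
-- def split_articles_by_empty_lines(content: str) -> List[str]:
--     """Split raw dictionary text into individual articles."""
--
--     lines = content.split('\n')
--     articles: List[str] = []
--     current: List[str] = []
--     skip_initial_metadata = True
--
--     for line in lines:
--         stripped = line.strip()
--
--         if skip_initial_metadata:
--             if not stripped or stripped.startswith('$'):
--                 continue
--             skip_initial_metadata = False
--
--         if not stripped:
--             if current: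
--                 articles.append('\n'.join(current))
--                 current = []
--             continue
--
--         current.append(line)
--
--     if current:
--         articles.append('\n'.join(current))
--
--     return articles
-- ===== SOURCE B (Python) =====
-- def split_articles_by_empty_lines(content):
--     """Split raw dictionary text into individual articles.
--
--     Two-phase index scan: first skip the leading metadata/blank lines,
--     then cut maximal runs of non-blank lines with span-style index jumps.
--     """
--     lines = content.split('\n')
--     n = len(lines)
--     i = 0
--     while i < n and (not lines[i].strip() or lines[i].strip().startswith('$')):
--         i += 1
--     articles = []
--     while i < n:
--         if not lines[i].strip():
--             i += 1
--             continue
--         j = i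
--         while j < n and lines[j].strip():
--             j += 1
--         articles.append('\n'.join(lines[i:j]))
--         i = j
--     return articles
-- ===== Notes on version B (the rewrite author's own statement) =====
-- stated objective: alternative
-- what changed: Replaced A's single flag-driven state machine (skip flag plus a current-article accumulator mutated per line) by a two-phase scan: first skip the leading metadata and blank lines, then cut maximal runs of non-blank lines with span-style index jumps and join each run.
import Mathlib
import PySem

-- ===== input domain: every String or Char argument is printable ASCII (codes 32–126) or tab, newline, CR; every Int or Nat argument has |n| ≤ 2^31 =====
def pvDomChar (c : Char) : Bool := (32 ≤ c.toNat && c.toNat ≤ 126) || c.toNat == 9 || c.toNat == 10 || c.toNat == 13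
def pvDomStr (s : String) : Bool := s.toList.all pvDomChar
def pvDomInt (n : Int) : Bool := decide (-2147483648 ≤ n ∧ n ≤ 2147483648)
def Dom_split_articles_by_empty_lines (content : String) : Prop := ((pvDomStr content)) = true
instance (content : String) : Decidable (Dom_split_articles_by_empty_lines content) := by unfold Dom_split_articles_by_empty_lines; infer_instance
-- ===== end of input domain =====

-- B replaces A's flag-driven accumulator state machine by a two-phase scan (skip leading metadata,
-- then cut maximal non-blank runs); objective: alternative decomposition, same cost.

-- ===== PORT A =====
-- loop body of A's single for-loop; state = (articles, current, skip_initial_metadata)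
def pvStepA (st : List String × List String × Bool) (line : String) :
    List String × List String × Bool :=
  let stripped := PySem.Str.strip line
  let articles := st.1
  let current := st.2.1
  let skip := st.2.2
  if skip && (stripped == "" || PySem.Str.startswith stripped "$") then
    (articles, current, skip)
  else if stripped == "" then
    (if current.isEmpty then articles else articles ++ [PySem.Str.join "\n" current], [], false)
  else
    (articles, current ++ [line], false)

def split_articles_by_empty_lines (content : String) : List String :=
  let lines := (PySem.Str.split? content "\n").getD []   -- sep "\n" ≠ "", so split? is some
  let st := lines.foldl pvStepA ([], [], true)
  if st.2.1.isEmpty then st.1 else st.1 ++ [PySem.Str.join "\n" st.2.1]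

-- ===== PORT B =====
def pvIsContent (l : String) : Bool := !(PySem.Str.strip l == "")

def pvIsMeta (l : String) : Bool :=
  PySem.Str.strip l == "" || PySem.Str.startswith (PySem.Str.strip l) "$"

-- the second while-loop of Source B: cut maximal runs of content lines (takeWhile/dropWhile = the index spans)
def pvGroupRuns : List String → List String
  | [] => []
  | l :: rest =>
    if h : pvIsContent l then
      PySem.Str.join "\n" (List.takeWhile pvIsContent (l :: rest)) ::
        pvGroupRuns (List.dropWhile pvIsContent (l :: rest))
    else
      pvGroupRuns rest
  termination_by ls => ls.length
  decreasing_by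
    · simp only [List.dropWhile_cons, h, if_pos]
      exact Nat.lt_succ_of_le (List.length_dropWhile_le _ _)
    · simp

def split_articles_by_empty_lines_alt (content : String) : List String :=
  let lines := (PySem.Str.split? content "\n").getD []
  pvGroupRuns (List.dropWhile pvIsMeta lines)

-- ===== PRECONDITION & SPEC =====
def Spec_split_articles_by_empty_lines (content : String) (out : List String) : Prop := out = split_articles_by_empty_lines_alt content
instance (content : String) (out : List String) : Decidable (Spec_split_articles_by_empty_lines content out) := by unfold Spec_split_articles_by_empty_lines; infer_instance

-- ===== CLAIM (what is proved, stated in full; the proofs are below) =====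
def Claim_equal_split_articles_by_empty_lines : Prop := ∀ (content : String), Dom_split_articles_by_empty_lines content → Spec_split_articles_by_empty_lines content (split_articles_by_empty_lines content)

-- ===== LEMMAS AND PROOFS =====

-- finalization step of A (the trailing 'if current:')
def pvFin (st : List String × List String × Bool) : List String :=
  if st.2.1.isEmpty then st.1 else st.1 ++ [PySem.Str.join "\n" st.2.1]

-- A's main phase as a structural recursion (proof-side model)
def pvF (cur : List String) : List String → List String
  | [] => if cur.isEmpty then [] else [PySem.Str.join "\n" cur]
  | l :: ls =>
    if pvIsContent l then pvF (cur ++ [l]) ls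
    else if cur.isEmpty then pvF [] ls
    else PySem.Str.join "\n" cur :: pvF [] ls

theorem stepA_skip_meta (arts cur : List String) (l : String) (h : pvIsMeta l = true) :
    pvStepA (arts, cur, true) l = (arts, cur, true) := by
  unfold pvIsMeta at h
  unfold pvStepA
  simp only [Bool.true_and]
  rw [if_pos h]

theorem stepA_skip_content (arts cur : List String) (l : String) (h : pvIsMeta l = false) :
    pvStepA (arts, cur, true) l = (arts, cur ++ [l], false) := by
  unfold pvIsMeta at h
  have h1 := (Bool.or_eq_false_iff.mp h).1
  unfold pvStepA
  simp only [Bool.true_and]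
  rw [h, h1]
  rfl

theorem stepA_blank (arts cur : List String) (l : String) (h : pvIsContent l = false) :
    pvStepA (arts, cur, false) l =
      (if cur.isEmpty then arts else arts ++ [PySem.Str.join "\n" cur], [], false) := by
  have h' : (PySem.Str.strip l == "") = true := by
    unfold pvIsContent at h
    cases hx : (PySem.Str.strip l == "") <;> simp [hx] at h ⊢
  unfold pvStepA
  simp only [Bool.false_and, Bool.false_eq_true, if_false]
  rw [if_pos h']

theorem stepA_content (arts cur : List String) (l : String) (h : pvIsContent l = true) :
    pvStepA (arts, cur, false) l = (arts, cur ++ [l], false) := by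
  have h' : (PySem.Str.strip l == "") = false := by
    unfold pvIsContent at h
    cases hx : (PySem.Str.strip l == "") <;> simp [hx] at h ⊢
  unfold pvStepA
  simp only [Bool.false_and, Bool.false_eq_true, if_false]
  rw [h']
  rfl

theorem foldA_false (ls : List String) : ∀ (arts cur : List String),
    pvFin (ls.foldl pvStepA (arts, cur, false)) = arts ++ pvF cur ls := by
  induction ls with
  | nil =>
    intro arts cur
    by_cases h : cur.isEmpty <;> simp [pvFin, pvF, h]
  | cons l ls ih =>
    intro arts cur
    cases h : pvIsContent l with
    | true => rw [List.foldl_cons, stepA_content _ _ _ h, ih, pvF, if_pos h]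
    | false =>
      rw [List.foldl_cons, stepA_blank _ _ _ h]
      by_cases hc : cur = []
      · subst hc
        rw [if_pos List.isEmpty_nil, ih, pvF, if_neg (by simp [h]), if_pos List.isEmpty_nil]
      · rw [if_neg (by simpa [List.isEmpty_iff] using hc), ih, pvF,
          if_neg (by simp [h]), if_neg (by simpa [List.isEmpty_iff] using hc)]
        simp

theorem foldA_skip (ls : List String) : ∀ (arts : List String),
    pvFin (ls.foldl pvStepA (arts, [], true)) =
      arts ++ pvF [] (List.dropWhile pvIsMeta ls) := by
  induction ls with
  | nil => intro arts; simp [pvFin, pvF]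
  | cons l ls ih =>
    intro arts
    cases h : pvIsMeta l with
    | true => rw [List.foldl_cons, stepA_skip_meta _ _ _ h, ih, List.dropWhile_cons_of_pos h]
    | false =>
      have h' := h
      unfold pvIsMeta at h'
      have h1 := (Bool.or_eq_false_iff.mp h').1
      have hcont : pvIsContent l = true := by
        unfold pvIsContent
        rw [h1]
        rfl
      rw [List.foldl_cons, stepA_skip_content _ _ _ h, foldA_false,
        List.dropWhile_cons_of_neg (by simp [h]), pvF, if_pos hcont]

theorem pvF_eq (ls : List String) :
    (∀ cur : List String, cur ≠ [] →
      pvF cur ls = PySem.Str.join "\n" (cur ++ List.takeWhile pvIsContent ls) ::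
        pvGroupRuns (List.dropWhile pvIsContent ls)) ∧
    pvF [] ls = pvGroupRuns ls := by
  induction ls with
  | nil =>
    refine ⟨fun cur hcur => ?_, by simp [pvF, pvGroupRuns]⟩
    simp [pvF, pvGroupRuns, List.isEmpty_iff, hcur]
  | cons l ls ih =>
    constructor
    · intro cur hcur
      cases h : pvIsContent l with
      | true =>
        rw [pvF, if_pos h, ih.1 (cur ++ [l]) (by simp),
          List.takeWhile_cons_of_pos h, List.dropWhile_cons_of_pos h]
        simp
      | false =>
        rw [pvF, if_neg (by simp [h]), if_neg (by simpa [List.isEmpty_iff] using hcur),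
          List.takeWhile_cons_of_neg (by simp [h]), List.dropWhile_cons_of_neg (by simp [h]),
          ih.2, pvGroupRuns, dif_neg (by simp [h])]
        simp
    · cases h : pvIsContent l with
      | true =>
        rw [pvF, if_pos h, pvGroupRuns, dif_pos h]
        have := ih.1 [l] (by simp)
        rw [List.nil_append, this, List.takeWhile_cons_of_pos h, List.dropWhile_cons_of_pos h,
          List.singleton_append]
      | false =>
        rw [pvF, if_neg (by simp [h]), if_pos List.isEmpty_nil, ih.2, pvGroupRuns, dif_neg (by simp [h])]

-- ===== VERDICT (by name: the statement is the Claim_ definition above) =====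
theorem split_articles_by_empty_lines_spec : Claim_equal_split_articles_by_empty_lines := by
  intro content _
  show split_articles_by_empty_lines content = split_articles_by_empty_lines_alt content
  unfold split_articles_by_empty_lines split_articles_by_empty_lines_alt
  have h := foldA_skip ((PySem.Str.split? content "\n").getD []) []
  simp only [pvFin] at h
  simp only [h, List.nil_append]
  exact (pvF_eq _).2
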